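-- pv_equiv track=rewrite | github.com/nhhoang96/MultiCL_Slot_Induction | code/utils/bert_segment_utils.py | rematch
-- ===== SOURCE A (Python) =====
-- import unicodedata
--
-- def _is_special(ch):
-- 	return bool(ch) and (ch[0] =='[') and (ch[-1] ==']')
--
-- def _is_control(ch):
-- 	return unicodedata.category(ch) in ('Cc', 'Cf')
--
-- def rematch(text, tokens):
-- 	split_text = text.split(' ')
-- 	normalized_text, char_mapping = '', []
-- 	for i, ch in enumerate(text):
-- 		ch = unicodedata.normalize('NFD', ch)
-- 		ch = ''.join([c for c in ch if unicodedata.category(c) != 'Mn'])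
-- 		ch = ''.join([
-- 				c for c in ch
-- 				if not (ord(c) == 0 or ord(c) == 0xfffd or _is_control(c))
-- 		])
-- 		normalized_text += ch
-- 		char_mapping.extend([i]* len(ch))
-- 	char_mapping = [i for i in range(len(tokens))]
-- 	text, token_mapping, offset = normalized_text, [], 0
-- 	counter =0
-- 	prev_token = None
--
-- 	dangerous_tokens=['-', '&',':',"'", '’']
-- 	for token in tokens:
-- 		if _is_special(token):
-- 			token_mapping.append([])
-- 		else:
-- 			start = tokens[offset:].index(token) + offset
-- 			end = start + 1
-- 			if (token.startswith('##')):
-- 				token_mapping[counter].append(char_mapping[start:end][0])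
-- 			else:
--
-- 				token_mapping.append(char_mapping[start:end])
-- 				counter += 1
-- 			offset = end
-- 			prev_token = token
-- 	return token_mapping
-- ===== SOURCE B (Python) =====
-- def rematch(text, tokens):
--     # Single pass: each non-special token maps to its own index (skipped positions
--     # are always '[...]'-shaped specials, which never equal a non-special token),
--     # so the inner tokens[offset:].index scan and the dead normalization pass of A
--     # are removed entirely. '##' subwords are merged into the last emitted entry.
--     mapping = []
--     for i, tok in enumerate(tokens):
--         if tok and tok[0] == '[' and tok[-1] == ']':
--             mapping.append([])
--         elif tok.startswith('##'):
--             mapping[-1].append(i)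
--         else:
--             mapping.append([i])
--     return mapping
-- ===== Notes on version B (the rewrite author's own statement) =====
-- stated objective: faster
-- what changed: B is one direct pass over enumerate(tokens): it drops A's dead normalization/char_mapping pass and A's inner tokens[offset:].index scan (each non-special token provably sits at its own index), and merges '##' subwords into the last emitted entry instead of indexing by A's counter.
-- intended difference: On token lists containing a '##'-prefixed token preceded by two or more special '[...]' tokens, A appends the subword index into the wrong slot token_mapping[counter] (an entry counter positions from the front, e.g. a special's empty list), while B appends it to the last emitted entry, which is the intended merge of a subword with its preceding token. — e.g. on rematch("", ["[A]", "[B]", "a", "##b"]): A returns [[], [3], [2]], B returns [[], [], [2, 3]]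
import Mathlib
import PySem

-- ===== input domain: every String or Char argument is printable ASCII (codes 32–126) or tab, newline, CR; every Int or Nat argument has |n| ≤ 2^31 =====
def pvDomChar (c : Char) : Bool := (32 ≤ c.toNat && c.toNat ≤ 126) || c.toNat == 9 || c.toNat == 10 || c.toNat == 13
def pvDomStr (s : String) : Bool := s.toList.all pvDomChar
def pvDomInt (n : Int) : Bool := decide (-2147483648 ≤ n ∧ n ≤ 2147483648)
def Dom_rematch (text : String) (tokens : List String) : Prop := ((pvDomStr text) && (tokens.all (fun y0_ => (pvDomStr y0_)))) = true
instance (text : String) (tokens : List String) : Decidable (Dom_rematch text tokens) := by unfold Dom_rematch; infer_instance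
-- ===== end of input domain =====

-- B removes A's dead normalization pass and A's inner tokens[offset:].index scan
-- (one direct pass instead); on '##' tokens with ≥2 preceding specials B merges the
-- subword into the last emitted entry where A writes into the slot token_mapping[counter].

-- ===== PORT A =====
-- _is_special(ch): bool(ch) and ch[0] == '[' and ch[-1] == ']'
def isSpecial (ch : String) : Bool :=
  !ch.toList.isEmpty
    && (PySem.List.pyGet? ch.toList 0 == some '[')
    && (PySem.List.pyGet? ch.toList (-1) == some ']')

-- token.startswith('##')
def isSub (t : String) : Bool := PySem.Str.startswith t "##"

-- char_mapping after A overwrites it: [i for i in range(len(tokens))]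
def charMappingA (tokens : List String) : List Int :=
  (List.range tokens.length).map (fun i => Int.ofNat i)

-- A's loop body over (token_mapping, offset, counter); token_mapping[counter].append
-- is List.modify (Python raises IndexError when counter is out of range — excluded by Pre_)
def stepA (tokens : List String) (charMapping : List Int) :
    List (List Int) × Nat × Nat → String → List (List Int) × Nat × Nat
  | (tm, offset, counter), token =>
  if isSpecial token then
    (tm ++ [[]], offset, counter)
  else
    let start := (PySem.List.index? (tokens.drop offset) token).getD 0 + offset
    let endI := start + 1
    let chunk := PySem.List.slice charMapping (some (start : Int)) (some (endI : Int))
    if isSub token then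
      (tm.modify counter (fun l => l ++ [PySem.List.pyGetD chunk 0 0]), endI, counter)
    else
      (tm ++ [chunk], endI, counter + 1)

def rematch (text : String) (tokens : List String) : List (List Int) :=
  -- split_text and the normalization pass are dead code in A (char_mapping is
  -- overwritten below); ported on the ASCII domain: NFD is the identity, there are
  -- no 'Mn' marks, and the removed control characters are exactly tab/LF/CR
  let _splitText := PySem.Str.split? text " "
  let _normalized := text.toList.filter (fun c => !(c.toNat == 9 || c.toNat == 10 || c.toNat == 13))
  let charMapping := charMappingA tokens
  (tokens.foldl (stepA tokens charMapping) ([], 0, 0)).1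

-- ===== PORT B =====
-- B's loop body over mapping; mapping[-1].append is List.modify at the last index
-- (Python raises IndexError on an empty mapping — excluded by Pre_)
def stepB : List (List Int) → Int × String → List (List Int)
  | m, (i, tok) =>
  if isSpecial tok then m ++ [[]]
  else if isSub tok then m.modify (m.length - 1) (fun l => l ++ [i])
  else m ++ [[i]]

def rematch_alt (text : String) (tokens : List String) : List (List Int) :=
  (PySem.List.enumerate tokens 0).foldl stepB []

-- ===== PRECONDITION & SPEC =====
-- Pre_ excludes exactly the inputs on which A raises IndexError: a '##'-prefixed
-- token with no special '[...]' token anywhere before it in the list.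
def Pre_rematch (text : String) (tokens : List String) : Prop :=
  ∀ i : Fin tokens.length, isSub tokens[i] = true → 1 ≤ (tokens.take i).countP isSpecial

instance (text : String) (tokens : List String) : Decidable (Pre_rematch text tokens) := by
  unfold Pre_rematch; infer_instance

def pvWitness_rematch : String × List String := ("a b", ["[CLS]", "a", "##b", "[SEP]"])

-- On token lists with a '##' token preceded by ≥2 special tokens, A appends the
-- subword index into the wrong slot token_mapping[counter] (e.g. a special's empty
-- list) while B appends it to the last emitted entry, the intended subword merge.
def D_rematch (text : String) (tokens : List String) : Prop :=
  ∃ i : Fin tokens.length, isSub tokens[i] = true ∧ 2 ≤ (tokens.take i).countP isSpecial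

instance (text : String) (tokens : List String) : Decidable (D_rematch text tokens) := by
  unfold D_rematch; infer_instance

def Spec_rematch (text : String) (tokens : List String) (out : List (List Int)) : Prop :=
  ¬ D_rematch text tokens → out = rematch_alt text tokens

instance (text : String) (tokens : List String) (out : List (List Int)) : Decidable (Spec_rematch text tokens out) := by
  unfold Spec_rematch; infer_instance

def pvDiffWitness_rematch : String × List String := ("", ["[A]", "[B]", "a", "##b"])

def pvDiffWitnessOut_rematch : (List (List Int)) × (List (List Int)) :=
  ([[], [3], [2]], [[], [], [2, 3]])

-- ===== CLAIM (what is proved, stated in full; the proofs are below) =====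
def Claim_unchanged_rematch : Prop := ∀ (text : String) (tokens : List String), Dom_rematch text tokens → Pre_rematch text tokens → Spec_rematch text tokens (rematch text tokens)

def Claim_changed_rematch : Prop := Dom_rematch (pvDiffWitness_rematch.1) (pvDiffWitness_rematch.2) ∧ Pre_rematch (pvDiffWitness_rematch.1) (pvDiffWitness_rematch.2) ∧ D_rematch (pvDiffWitness_rematch.1) (pvDiffWitness_rematch.2) ∧ rematch (pvDiffWitness_rematch.1) (pvDiffWitness_rematch.2) = pvDiffWitnessOut_rematch.1 ∧ rematch_alt (pvDiffWitness_rematch.1) (pvDiffWitness_rematch.2) = pvDiffWitnessOut_rematch.2 ∧ pvDiffWitnessOut_rematch.1 ≠ pvDiffWitnessOut_rematch.2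

def Claim_exact_rematch : Prop := ∀ (text : String) (tokens : List String), Dom_rematch text tokens → Pre_rematch text tokens → D_rematch text tokens → rematch text tokens ≠ rematch_alt text tokens

-- ===== LEMMAS AND PROOFS =====

-- the first match of xs[k] in xs is at k when everything before is special and xs[k] is not
lemma index_self_of_prefix_special (xs : List String) (k : Nat) (hk : k < xs.length)
    (h : ∀ j (_ : j < xs.length), j < k → isSpecial xs[j] = true)
    (hx : isSpecial xs[k] = false) :
    PySem.List.index? xs xs[k] = some k := by
  induction xs generalizing k with
  | nil => simp at hk
  | cons x t ih =>
    cases k with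
    | zero => simpa using PySem.List.index?_cons_self x t
    | succ k =>
      have hk' : k < t.length := by simpa using hk
      have hxs : isSpecial x = true := by
        have := h 0 (by simp) (Nat.succ_pos k); simpa using this
      have hx' : isSpecial (t[k]'hk') = false := by simpa using hx
      have hne : x ≠ t[k]'hk' := by
        intro he; rw [← he] at hx'; simp [hxs] at hx'
      have hrec := ih k hk'
        (fun j hj hjk => by
          have := h (j+1) (by simpa using hj) (by omega); simpa using this)
        hx'
      have hcons := PySem.List.index?_cons_of_ne (x := x) (v := t[k]'hk') t hne
      have : (x :: t)[k+1]'hk = t[k]'hk' := by simp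
      rw [this, hcons, hrec]
      rfl

-- the slice char_mapping[i:i+1] is [i]
lemma chunk_eq (tokens : List String) (i : Nat) (hi : i < tokens.length) :
    PySem.List.slice (charMappingA tokens) (some (i : Int)) (some ((i + 1 : Nat) : Int)) = [(i : Int)] := by
  have h1 : ((i + 1 : Nat) : Int) = (i : Int) + (1 : Nat) := by push_cast; ring
  rw [h1, PySem.List.slice_natCast_add]
  have hlen : i < (charMappingA tokens).length := by simp [charMappingA]; omega
  rw [List.drop_eq_getElem_cons hlen]
  simp [charMappingA]

-- the main loop invariant: from position i on, with everything between offset and i special,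
-- counter = #plain tokens before i and tm.length = counter + #specials before i,
-- A's fold and B's fold produce the same list (Pre_ and ¬D_ pin each '##' slot)
lemma loop_eq (tokens : List String)
    (hP : ∀ i : Fin tokens.length, isSub tokens[i] = true → 1 ≤ (tokens.take i).countP isSpecial)
    (hD : ∀ i : Fin tokens.length, isSub tokens[i] = true → (tokens.take i).countP isSpecial ≤ 1) :
    ∀ (n i : Nat), i + n = tokens.length →
    ∀ (offset : Nat), offset ≤ i →
    (∀ j (_ : j < tokens.length), offset ≤ j → j < i → isSpecial tokens[j] = true) →
    ∀ (counter : Nat), counter = (tokens.take i).countP (fun t => !isSpecial t && !isSub t) →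
    ∀ (tm : List (List Int)), tm.length = counter + (tokens.take i).countP isSpecial →
    ((tokens.drop i).foldl (stepA tokens (charMappingA tokens)) (tm, offset, counter)).1
      = (PySem.List.enumerate (tokens.drop i) (i : Int)).foldl stepB tm := by
  intro n
  induction n with
  | zero =>
    intro i hi offset _ _ counter _ tm _
    have : tokens.drop i = [] := List.drop_eq_nil_of_le (by omega)
    simp [this]
  | succ n ih =>
    intro i hi offset hoff hspec counter hc tm hlen
    have hilt : i < tokens.length := by omega
    have hdrop : tokens.drop i = tokens[i] :: tokens.drop (i + 1) :=
      List.drop_eq_getElem_cons hilt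
    have htake : tokens.take (i + 1) = tokens.take i ++ [tokens[i]] := by
      rw [List.take_add_one, List.getElem?_eq_getElem hilt]; rfl
    rw [hdrop, PySem.List.enumerate_cons, List.foldl_cons, List.foldl_cons]
    by_cases hs : isSpecial tokens[i] = true
    · -- special token: both append []
      have hA : stepA tokens (charMappingA tokens) (tm, offset, counter) tokens[i]
          = (tm ++ [[]], offset, counter) := by simp [stepA, hs]
      have hB : stepB tm ((i : Int), tokens[i]) = tm ++ [[]] := by simp [stepB, hs]
      rw [hA, hB]
      have : ((i : Int) + 1) = ((i + 1 : Nat) : Int) := by push_cast; ring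
      rw [this]
      exact ih (i + 1) (by omega) offset (by omega)
        (fun j hj h1 h2 => by
          rcases Nat.lt_or_ge j i with h | h
          · exact hspec j hj h1 h
          · have : j = i := by omega
            subst this; exact hs)
        counter (by rw [htake, List.countP_append]; simp [hs, hc])
        (tm ++ [[]]) (by rw [htake, List.countP_append]; simp [hs]; omega)
    · -- non-special: A finds the token at its own index
      have hidx : PySem.List.index? (tokens.drop offset) tokens[i] = some (i - offset) := by
        have hlt : i - offset < (tokens.drop offset).length := by simp; omega
        have hget : (tokens.drop offset)[i - offset]'hlt = tokens[i] := by
          rw [List.getElem_drop]; congr 1; omega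
        rw [← hget]
        apply index_self_of_prefix_special _ _ hlt
        · intro j hj hjk
          rw [List.getElem_drop]
          exact hspec (offset + j) (by simp at hj; omega) (by omega) (by omega)
        · rw [hget]; simpa using hs
      have hstart : (PySem.List.index? (tokens.drop offset) tokens[i]).getD 0 + offset = i := by
        rw [hidx, Option.getD_some]; omega
      have hs' : isSpecial tokens[i] = false := by simpa using hs
      by_cases hb : isSub tokens[i] = true
      · -- '##' token: A modifies slot counter, B modifies the last slot; Pre_ ∧ ¬D_ make them equal
        have hone : (tokens.take i).countP isSpecial = 1 := by
          have h1 : 1 ≤ (tokens.take i).countP isSpecial := by simpa using hP ⟨i, hilt⟩ hb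
          have h2 : (tokens.take i).countP isSpecial ≤ 1 := by simpa using hD ⟨i, hilt⟩ hb
          omega
        have hA : stepA tokens (charMappingA tokens) (tm, offset, counter) tokens[i]
            = (tm.modify counter (fun l => l ++ [(i : Int)]), i + 1, counter) := by
          simp only [stepA, hs', hstart, hb]
          rw [chunk_eq tokens i hilt]
          simp [PySem.List.pyGetD_zero_cons]
        have hB : stepB tm ((i : Int), tokens[i]) = tm.modify (tm.length - 1) (fun l => l ++ [(i : Int)]) := by
          simp [stepB, hs', hb]
        have hslot : tm.length - 1 = counter := by omega
        rw [hA, hB, hslot]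
        have : ((i : Int) + 1) = ((i + 1 : Nat) : Int) := by push_cast; ring
        rw [this]
        exact ih (i + 1) (by omega) (i + 1) (by omega)
          (fun j hj h1 h2 => by omega)
          counter (by rw [htake, List.countP_append]; simp [hs', hb, hc])
          _ (by rw [List.length_modify, htake, List.countP_append]; simp [hs']; omega)
      · -- plain token: both append [i]
        have hb' : isSub tokens[i] = false := by simpa using hb
        have hA : stepA tokens (charMappingA tokens) (tm, offset, counter) tokens[i]
            = (tm ++ [[(i : Int)]], i + 1, counter + 1) := by
          simp only [stepA, hs', hstart, hb']
          rw [chunk_eq tokens i hilt]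
          simp
        have hB : stepB tm ((i : Int), tokens[i]) = tm ++ [[(i : Int)]] := by
          simp [stepB, hs', hb']
        rw [hA, hB]
        have : ((i : Int) + 1) = ((i + 1 : Nat) : Int) := by push_cast; ring
        rw [this]
        exact ih (i + 1) (by omega) (i + 1) (by omega)
          (fun j hj h1 h2 => by omega)
          (counter + 1) (by rw [htake, List.countP_append]; simp [hs', hb', hc])
          _ (by rw [htake, List.countP_append]; simp [hs']; omega)

-- a '##' token is never special (its first character is '#', not '[')
lemma sub_not_special (t : String) (h : isSub t = true) : isSpecial t = false := by
  have h0 : PySem.List.pyGet? t.toList 0 = some '#' := by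
    simp [isSub, PySem.Str.startswith, PySem.Chars.startswith] at h
    obtain ⟨rest, hr⟩ := h
    rw [← hr]
    simp [PySem.List.pyGet?_zero]
  simp [isSpecial, h0]

-- each A step either appends one entry or appends one element inside one slot
lemma stepA_shape (tokens : List String) (cm : List Int) (tm : List (List Int))
    (off cnt : Nat) (token : String) :
    ∃ tm' off' cnt', stepA tokens cm (tm, off, cnt) token = (tm', off', cnt') ∧
      ((∃ x, tm' = tm ++ [x]) ∨ (∃ e c', tm' = tm.modify c' (fun l => l ++ [e]))) := by
  by_cases hs : isSpecial token = true
  · exact ⟨tm ++ [[]], off, cnt, by simp [stepA, hs], Or.inl ⟨[], rfl⟩⟩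
  · have hs' : isSpecial token = false := by simpa using hs
    by_cases hb : isSub token = true
    · simp only [stepA, hs', hb, Bool.false_eq_true, if_false, if_true]
      exact ⟨_, _, _, rfl, Or.inr ⟨_, cnt, rfl⟩⟩
    · have hb' : isSub token = false := by simpa using hb
      simp only [stepA, hs', hb', Bool.false_eq_true, if_false]
      exact ⟨_, _, _, rfl, Or.inl ⟨_, rfl⟩⟩

-- each B step either appends one entry or appends one element inside the LAST slot
lemma stepB_shape (m : List (List Int)) (p : Int × String) :
    (∃ x, stepB m p = m ++ [x]) ∨ stepB m p = m.modify (m.length - 1) (fun l => l ++ [p.1]) := by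
  obtain ⟨i, tok⟩ := p
  by_cases hs : isSpecial tok = true
  · exact Or.inl ⟨[], by simp [stepB, hs]⟩
  · have hs' : isSpecial tok = false := by simpa using hs
    by_cases hb : isSub tok = true
    · exact Or.inr (by simp [stepB, hs', hb])
    · have hb' : isSub tok = false := by simpa using hb
      exact Or.inl ⟨[(i : Int)], by simp [stepB, hs', hb']⟩

-- A's remaining fold never shrinks slot c
lemma foldA_slot (tokens : List String) (cm : List Int) (c : Nat) :
    ∀ (rest : List String) (tm : List (List Int)) (off cnt : Nat) (v : List Int),
    tm[c]? = some v →
    ∃ w, ((rest.foldl (stepA tokens cm) (tm, off, cnt)).1)[c]? = some w ∧ v.length ≤ w.length := by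
  intro rest
  induction rest with
  | nil => intro tm off cnt v h; exact ⟨v, h, le_rfl⟩
  | cons t r ih =>
    intro tm off cnt v h
    have hc : c < tm.length := by
      obtain ⟨hlt, -⟩ := List.getElem?_eq_some_iff.mp h; exact hlt
    obtain ⟨tm', off', cnt', hstep, happend | hmod⟩ := stepA_shape tokens cm tm off cnt t
    · obtain ⟨x, hx⟩ := happend
      rw [List.foldl_cons, hstep]
      apply ih
      rw [hx, List.getElem?_append_left hc, h]
    · obtain ⟨e, c', he⟩ := hmod
      rw [List.foldl_cons, hstep]
      by_cases hcc : c' = c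
      · obtain ⟨w, hw, hlw⟩ := ih tm' off' cnt' (v ++ [e])
          (by rw [he, List.getElem?_modify, h]; simp [hcc])
        exact ⟨w, hw, by simp at hlw; omega⟩
      · apply ih
        rw [he, List.getElem?_modify, h]
        simp [hcc]
  
-- B's remaining fold never touches slot c when at least two slots follow it
lemma foldB_slot (c : Nat) :
    ∀ (ps : List (Int × String)) (m : List (List Int)) (v : List Int),
    c + 2 ≤ m.length → m[c]? = some v →
    ((ps.foldl stepB m))[c]? = some v := by
  intro ps
  induction ps with
  | nil => intro m v _ h; exact h
  | cons p r ih =>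
    intro m v hlen h
    have hc : c < m.length := by omega
    rw [List.foldl_cons]
    rcases stepB_shape m p with ⟨x, hx⟩ | hmod
    · apply ih
      · rw [hx]; simp; omega
      · rw [hx, List.getElem?_append_left hc, h]
    · apply ih
      · rw [hmod, List.length_modify]; omega
      · rw [hmod, List.getElem?_modify, h]
        have : ¬ (m.length - 1 = c) := by omega
        simp [this]

-- from any position with a diverging '##' token ahead, the two folds end unequal
lemma loop_ne (tokens : List String)
    (hP : ∀ i : Fin tokens.length, isSub tokens[i] = true → 1 ≤ (tokens.take i).countP isSpecial) :
    ∀ (n i : Nat), i + n = tokens.length →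
    ∀ (offset : Nat), offset ≤ i →
    (∀ j (_ : j < tokens.length), offset ≤ j → j < i → isSpecial tokens[j] = true) →
    ∀ (counter : Nat), counter = (tokens.take i).countP (fun t => !isSpecial t && !isSub t) →
    ∀ (tm : List (List Int)), tm.length = counter + (tokens.take i).countP isSpecial →
    (∃ j : Fin tokens.length, i ≤ (j : Nat) ∧ isSub tokens[j] = true ∧ 2 ≤ (tokens.take j).countP isSpecial) →
    ((tokens.drop i).foldl (stepA tokens (charMappingA tokens)) (tm, offset, counter)).1
      ≠ (PySem.List.enumerate (tokens.drop i) (i : Int)).foldl stepB tm := by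
  intro n
  induction n with
  | zero =>
    intro i hi offset _ _ counter _ tm _ hj
    obtain ⟨j, hij, _, _⟩ := hj
    have := j.isLt
    omega
  | succ n ih =>
    intro i hi offset hoff hspec counter hc tm hlen hj
    have hilt : i < tokens.length := by omega
    have hdrop : tokens.drop i = tokens[i] :: tokens.drop (i + 1) :=
      List.drop_eq_getElem_cons hilt
    have htake : tokens.take (i + 1) = tokens.take i ++ [tokens[i]] := by
      rw [List.take_add_one, List.getElem?_eq_getElem hilt]; rfl
    obtain ⟨j, hij, hjsub, hjcnt⟩ := hj
    have htokeq : (j : Nat) = i → tokens[j] = tokens[i]'hilt := by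
      intro he
      subst he
      rfl
    rw [hdrop, PySem.List.enumerate_cons, List.foldl_cons, List.foldl_cons]
    by_cases hs : isSpecial tokens[i] = true
    · -- special token: same step on both sides
      have hA : stepA tokens (charMappingA tokens) (tm, offset, counter) tokens[i]
          = (tm ++ [[]], offset, counter) := by simp [stepA, hs]
      have hB : stepB tm ((i : Int), tokens[i]) = tm ++ [[]] := by simp [stepB, hs]
      rw [hA, hB]
      have hcast : ((i : Int) + 1) = ((i + 1 : Nat) : Int) := by push_cast; ring
      rw [hcast]
      have hji : (j : Nat) ≠ i := by
        intro he
        have hfalse := sub_not_special _ hjsub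
        rw [htokeq he] at hfalse
        simp [hfalse] at hs
      exact ih (i + 1) (by omega) offset (by omega)
        (fun k hk h1 h2 => by
          rcases Nat.lt_or_ge k i with h | h
          · exact hspec k hk h1 h
          · have : k = i := by omega
            subst this; exact hs)
        counter (by rw [htake, List.countP_append]; simp [hs, hc])
        (tm ++ [[]]) (by rw [htake, List.countP_append]; simp [hs]; omega)
        ⟨j, by omega, hjsub, hjcnt⟩
    · have hidx : PySem.List.index? (tokens.drop offset) tokens[i] = some (i - offset) := by
        have hlt : i - offset < (tokens.drop offset).length := by simp; omega
        have hget : (tokens.drop offset)[i - offset]'hlt = tokens[i] := by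
          rw [List.getElem_drop]; congr 1; omega
        rw [← hget]
        apply index_self_of_prefix_special _ _ hlt
        · intro k hk hkk
          rw [List.getElem_drop]
          exact hspec (offset + k) (by simp at hk; omega) (by omega) (by omega)
        · rw [hget]; simpa using hs
      have hstart : (PySem.List.index? (tokens.drop offset) tokens[i]).getD 0 + offset = i := by
        rw [hidx, Option.getD_some]; omega
      have hs' : isSpecial tokens[i] = false := by simpa using hs
      by_cases hb : isSub tokens[i] = true
      · by_cases h2 : 2 ≤ (tokens.take i).countP isSpecial
        · -- THE DIVERGING STEP: A writes into slot counter, B into slot tm.length - 1 > counter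
          have hA : stepA tokens (charMappingA tokens) (tm, offset, counter) tokens[i]
              = (tm.modify counter (fun l => l ++ [(i : Int)]), i + 1, counter) := by
            simp only [stepA, hs', hstart, hb]
            rw [chunk_eq tokens i hilt]
            simp [PySem.List.pyGetD_zero_cons]
          have hB : stepB tm ((i : Int), tokens[i]) = tm.modify (tm.length - 1) (fun l => l ++ [(i : Int)]) := by
            simp [stepB, hs', hb]
          rw [hA, hB]
          have hclt : counter + 2 ≤ tm.length := by omega
          have hc' : counter < tm.length := by omega
          intro heq
          -- slot counter of A's result is strictly longer than tm[counter]
          have hA0 : (tm.modify counter (fun l => l ++ [(i : Int)]))[counter]? = some (tm[counter] ++ [(i : Int)]) := by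
            rw [List.getElem?_modify, List.getElem?_eq_getElem hc']; simp
          obtain ⟨w, hw, hlw⟩ := foldA_slot tokens (charMappingA tokens) counter
            (tokens.drop (i + 1)) _ (i + 1) counter _ hA0
          -- slot counter of B's result is exactly tm[counter]
          have hB0 : (tm.modify (tm.length - 1) (fun l => l ++ [(i : Int)]))[counter]? = some tm[counter] := by
            rw [List.getElem?_modify, List.getElem?_eq_getElem hc']
            have : ¬ (tm.length - 1 = counter) := by omega
            simp [this]
          have hBL := foldB_slot counter (PySem.List.enumerate (tokens.drop (i + 1)) ((i : Int) + 1)) _ _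
            (by rw [List.length_modify]; omega) hB0
          rw [heq, hBL] at hw
          have hweq : w = tm[counter] := by
            have := hw; simp at this; exact this.symm
          rw [hweq] at hlw
          simp at hlw
        · -- non-diverging '##' token: exactly one special before it; same step on both sides
          have hone : (tokens.take i).countP isSpecial = 1 := by
            have h1 : 1 ≤ (tokens.take i).countP isSpecial := by simpa using hP ⟨i, hilt⟩ hb
            omega
          have hA : stepA tokens (charMappingA tokens) (tm, offset, counter) tokens[i]
              = (tm.modify counter (fun l => l ++ [(i : Int)]), i + 1, counter) := by
            simp only [stepA, hs', hstart, hb]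
            rw [chunk_eq tokens i hilt]
            simp [PySem.List.pyGetD_zero_cons]
          have hB : stepB tm ((i : Int), tokens[i]) = tm.modify (tm.length - 1) (fun l => l ++ [(i : Int)]) := by
            simp [stepB, hs', hb]
          have hslot : tm.length - 1 = counter := by omega
          rw [hA, hB, hslot]
          have hcast : ((i : Int) + 1) = ((i + 1 : Nat) : Int) := by push_cast; ring
          rw [hcast]
          have hji : (j : Nat) ≠ i := by
            intro he
            simp only [he] at hjcnt; omega
          exact ih (i + 1) (by omega) (i + 1) (by omega)
            (fun k hk h1 h2 => by omega)
            counter (by rw [htake, List.countP_append]; simp [hs', hb, hc])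
            _ (by rw [List.length_modify, htake, List.countP_append]; simp [hs']; omega)
            ⟨j, by omega, hjsub, hjcnt⟩
      · -- plain token: same step on both sides
        have hb' : isSub tokens[i] = false := by simpa using hb
        have hA : stepA tokens (charMappingA tokens) (tm, offset, counter) tokens[i]
            = (tm ++ [[(i : Int)]], i + 1, counter + 1) := by
          simp only [stepA, hs', hstart, hb']
          rw [chunk_eq tokens i hilt]
          simp
        have hB : stepB tm ((i : Int), tokens[i]) = tm ++ [[(i : Int)]] := by
          simp [stepB, hs', hb']
        rw [hA, hB]
        have hcast : ((i : Int) + 1) = ((i + 1 : Nat) : Int) := by push_cast; ring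
        rw [hcast]
        have hji : (j : Nat) ≠ i := by
          intro he
          have hsubi := hjsub
          rw [htokeq he] at hsubi
          simp [hb'] at hsubi
        exact ih (i + 1) (by omega) (i + 1) (by omega)
          (fun k hk h1 h2 => by omega)
          (counter + 1) (by rw [htake, List.countP_append]; simp [hs', hb', hc])
          _ (by rw [htake, List.countP_append]; simp [hs']; omega)
          ⟨j, by omega, hjsub, hjcnt⟩

-- ===== VERDICT (by name: the statement is the Claim_ definition above) =====
theorem rematch_spec : Claim_unchanged_rematch := by
  intro text tokens _ hPre hnD
  have hD : ∀ i : Fin tokens.length, isSub tokens[i] = true → (tokens.take i).countP isSpecial ≤ 1 := by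
    intro i hi
    by_contra h
    exact hnD ⟨i, hi, by omega⟩
  unfold rematch rematch_alt
  have := loop_eq tokens hPre hD tokens.length 0 (by omega) 0 (by omega)
    (fun j hj h1 h2 => by omega) 0 (by simp) [] (by simp)
  simpa using this

theorem rematch_changed : Claim_changed_rematch := by
  unfold Claim_changed_rematch; decide

theorem rematch_tight : Claim_exact_rematch := by
  intro text tokens _ hPre hD
  obtain ⟨j, hjsub, hjcnt⟩ := hD
  unfold rematch rematch_alt
  have := loop_ne tokens hPre tokens.length 0 (by omega) 0 (by omega)
    (fun k hk h1 h2 => by omega) 0 (by simp) [] (by simp)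
    ⟨j, by omega, hjsub, hjcnt⟩
  simpa using this
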